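-- pv_equiv track=rewrite | github.com/tractatus1889/metaexamples | metaexamples/grammars.py | g2_is_valid
-- ===== SOURCE A (Python) =====
-- from typing import Callable, List, Sequence, Tuple
--
-- DEFAULT_MAX_LEN = 12
--
-- DEFAULT_MIN_LEN = 1
--
-- def _tokens_from_text(text: str) -> List[str]:
--     """Split a grammar document into symbol tokens."""
--     return text.strip().split()
--
-- def _is_valid_length(tokens: Sequence[str], min_len: int, max_len: int) -> bool:
--     return min_len <= len(tokens) <= max_len
--
-- def g2_is_valid(
--     text: str,
--     alphabet: Sequence[str],
--     min_len: int = DEFAULT_MIN_LEN,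
--     max_len: int = DEFAULT_MAX_LEN,
-- ) -> bool:
--     """
--     g2: all tokens must be from the alphabet, bounds apply, and each symbol count is even.
--     """
--     tokens = _tokens_from_text(text)
--     if not _is_valid_length(tokens, min_len, max_len):
--         return False
--     if any(t not in alphabet for t in tokens):
--         return False
--     for symbol in alphabet:
--         if tokens.count(symbol) % 2 == 1:
--             return False
--     return True
-- ===== SOURCE B (Python) =====
-- DEFAULT_MAX_LEN = 12
-- DEFAULT_MIN_LEN = 1
--
-- def g2_is_valid(text, alphabet, min_len=DEFAULT_MIN_LEN, max_len=DEFAULT_MAX_LEN):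
--     tokens = text.strip().split()
--     if not (min_len <= len(tokens) <= max_len):
--         return False
--     allowed = set(alphabet)
--     odd = set()
--     for t in tokens:
--         if t not in allowed:
--             return False
--         if t in odd:
--             odd.discard(t)
--         else:
--             odd.add(t)
--     return not odd
-- ===== Notes on version B (the rewrite author's own statement) =====
-- stated objective: alternative
-- what changed: After the length check B does a single pass over the tokens maintaining a parity set of odd-count symbols (toggle per token, membership against set(alphabet)), so A's final loop over the alphabet with a tokens.count scan per symbol disappears.
import Mathlib
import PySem

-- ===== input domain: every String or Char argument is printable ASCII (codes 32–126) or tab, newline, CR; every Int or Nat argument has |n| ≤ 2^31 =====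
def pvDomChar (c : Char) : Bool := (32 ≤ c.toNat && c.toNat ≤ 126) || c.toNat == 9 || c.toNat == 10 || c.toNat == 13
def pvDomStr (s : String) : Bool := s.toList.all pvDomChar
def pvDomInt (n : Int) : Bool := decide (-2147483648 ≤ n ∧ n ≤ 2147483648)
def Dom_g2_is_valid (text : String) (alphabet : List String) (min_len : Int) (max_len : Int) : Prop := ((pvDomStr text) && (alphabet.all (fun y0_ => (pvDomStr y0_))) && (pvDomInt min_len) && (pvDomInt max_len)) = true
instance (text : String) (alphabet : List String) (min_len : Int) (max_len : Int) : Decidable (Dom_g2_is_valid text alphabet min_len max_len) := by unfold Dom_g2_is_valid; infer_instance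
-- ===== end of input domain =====

-- B replaces A's per-alphabet-symbol counting pass by one pass over the tokens that toggles a
-- parity set of odd-count symbols (objective: alternative algorithm).

-- ===== PORT A =====
def g2_is_valid (text : String) (alphabet : List String) (min_len : Int) (max_len : Int) : Bool :=
  let tokens := PySem.Str.split₀ (PySem.Str.strip text)
  if !(decide (min_len ≤ (tokens.length : Int)) && decide ((tokens.length : Int) ≤ max_len)) then false
  else if tokens.any (fun t => !(alphabet.contains t)) then false
  else if alphabet.any (fun symbol => PySem.List.count tokens symbol % 2 == 1) then false
  else true

-- ===== PORT B =====
-- the 'for t in tokens' loop of Source B with its early 'return False' (none = returned False)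
def g2AltLoop (allowed : PySem.Set String) : List String → PySem.Set String → Option (PySem.Set String)
  | [], odd => some odd
  | t :: ts, odd =>
    if !(PySem.Set.contains allowed t) then none
    else g2AltLoop allowed ts
      (if PySem.Set.contains odd t then PySem.Set.discard odd t else PySem.Set.add odd t)

def g2_is_valid_alt (text : String) (alphabet : List String) (min_len : Int) (max_len : Int) : Bool :=
  let tokens := PySem.Str.split₀ (PySem.Str.strip text)
  if !(decide (min_len ≤ (tokens.length : Int)) && decide ((tokens.length : Int) ≤ max_len)) then false
  else
    match g2AltLoop (PySem.Set.ofList alphabet) tokens PySem.Set.empty with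
    | none => false
    | some odd => odd.isEmpty

-- ===== PRECONDITION & SPEC =====
def Spec_g2_is_valid (text : String) (alphabet : List String) (min_len : Int) (max_len : Int) (out : Bool) : Prop := out = g2_is_valid_alt text alphabet min_len max_len
instance (text : String) (alphabet : List String) (min_len : Int) (max_len : Int) (out : Bool) : Decidable (Spec_g2_is_valid text alphabet min_len max_len out) := by unfold Spec_g2_is_valid; infer_instance

-- ===== CLAIM (what is proved, stated in full; the proofs are below) =====
def Claim_equal_g2_is_valid : Prop := ∀ (text : String) (alphabet : List String) (min_len : Int) (max_len : Int), Dom_g2_is_valid text alphabet min_len max_len → Spec_g2_is_valid text alphabet min_len max_len (g2_is_valid text alphabet min_len max_len)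

-- ===== LEMMAS AND PROOFS =====

-- the loop returns None (early False) exactly when some token is outside the allowed set
theorem g2AltLoop_eq_none_iff (allowed : PySem.Set String) (ts : List String)
    (odd : PySem.Set String) :
    g2AltLoop allowed ts odd = none ↔ ∃ t ∈ ts, t ∉ allowed := by
  induction ts generalizing odd with
  | nil => simp [g2AltLoop]
  | cons t ts ih =>
    cases hc : PySem.Set.contains allowed t with
    | true =>
      have ht : t ∈ allowed := (PySem.Set.contains_iff _ _).1 hc
      simp [g2AltLoop, hc, ih, ht]
    | false =>
      have ht : t ∉ allowed := fun hm => by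
        rw [(PySem.Set.contains_iff _ _).2 hm] at hc; cases hc
      simp only [g2AltLoop, hc, Bool.not_false, if_true]
      exact iff_of_true trivial ⟨t, List.mem_cons_self, ht⟩

-- when every token is allowed the loop ends with the parity set: x is in the result iff
-- (x in the initial set) XOR (x has odd count in the tokens)
theorem g2AltLoop_eq_some (allowed : PySem.Set String) (ts : List String)
    (odd : PySem.Set String) (h : ∀ t ∈ ts, t ∈ allowed) :
    ∃ odd', g2AltLoop allowed ts odd = some odd' ∧
      ∀ x, x ∈ odd' ↔ ¬ (x ∈ odd ↔ ts.count x % 2 = 1) := by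
  induction ts generalizing odd with
  | nil =>
    refine ⟨odd, rfl, fun x => ?_⟩
    simp
  | cons t ts ih =>
    have ht : t ∈ allowed := h t List.mem_cons_self
    have hc : PySem.Set.contains allowed t = true := (PySem.Set.contains_iff _ _).2 ht
    have step : g2AltLoop allowed (t :: ts) odd =
        g2AltLoop allowed ts
          (if PySem.Set.contains odd t then PySem.Set.discard odd t else PySem.Set.add odd t) := by
      simp only [g2AltLoop, hc, Bool.not_true, Bool.false_eq_true, if_false]
    obtain ⟨odd', heq, hmem⟩ :=
      ih (if PySem.Set.contains odd t then PySem.Set.discard odd t else PySem.Set.add odd t)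
        (fun u hu => h u (List.mem_cons_of_mem _ hu))
    refine ⟨odd', step ▸ heq, fun x => ?_⟩
    rw [hmem x]
    by_cases hx : x = t
    · subst hx
      rw [List.count_cons_self]
      by_cases hin : x ∈ odd
      · have hct : PySem.Set.contains odd x = true := (PySem.Set.contains_iff _ _).2 hin
        simp only [hct, if_true]
        simp [PySem.Set.mem_discard, hin]
        omega
      · have hcf : PySem.Set.contains odd x = false := by
          cases hcx : PySem.Set.contains odd x
          · rfl
          · exact absurd ((PySem.Set.contains_iff _ _).1 hcx) hin
        simp only [hcf, if_false]
        simp [PySem.Set.mem_add, hin]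
        omega
    · have hcc : List.count x (t :: ts) = List.count x ts := by
        simp [List.count_cons]
        exact fun h2 => hx h2.symm
      rw [hcc]
      by_cases hin : x ∈ odd
      · have hd : x ∈ PySem.Set.discard odd t := (PySem.Set.mem_discard _ _ _).2 ⟨hin, hx⟩
        have ha : x ∈ PySem.Set.add odd t := (PySem.Set.mem_add _ _ _).2 (Or.inl hin)
        split_ifs <;> simp [hd, ha, hin]
      · have hd : x ∉ PySem.Set.discard odd t := fun hc' => hin ((PySem.Set.mem_discard _ _ _).1 hc').1
        have ha : x ∉ PySem.Set.add odd t := fun hc' => by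
          rcases (PySem.Set.mem_add _ _ _).1 hc' with h' | h'
          · exact hin h'
          · exact hx h'
        split_ifs <;> simp [hd, ha, hin]

-- ===== VERDICT (by name: the statement is the Claim_ definition above) =====
theorem g2_is_valid_spec : Claim_equal_g2_is_valid := by
  intro text alphabet min_len max_len _
  unfold Spec_g2_is_valid g2_is_valid g2_is_valid_alt
  set tokens := PySem.Str.split₀ (PySem.Str.strip text) with htok
  by_cases hlen : (decide (min_len ≤ (tokens.length : Int)) && decide ((tokens.length : Int) ≤ max_len)) = true
  · simp only [hlen, Bool.not_true, Bool.false_eq_true, if_false]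
    by_cases hbad : ∃ t ∈ tokens, ¬ t ∈ alphabet
    · -- some token outside the alphabet: both return false
      have hA : tokens.any (fun t => !(alphabet.contains t)) = true := by
        obtain ⟨t, ht, hna⟩ := hbad
        refine List.any_eq_true.2 ⟨t, ht, ?_⟩
        simp [hna]
      have hB : g2AltLoop (PySem.Set.ofList alphabet) tokens PySem.Set.empty = none := by
        rw [g2AltLoop_eq_none_iff]
        obtain ⟨t, ht, hna⟩ := hbad
        exact ⟨t, ht, fun hc => hna ((PySem.Set.mem_ofList _ _).1 hc)⟩
      rw [hA, hB]
      rfl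
    · push_neg at hbad
      have hA : tokens.any (fun t => !(alphabet.contains t)) = false := by
        simp only [List.any_eq_false]
        intro t ht
        simp [hbad t ht]
      obtain ⟨odd', heq, hmem⟩ :=
        g2AltLoop_eq_some (PySem.Set.ofList alphabet) tokens PySem.Set.empty
          (fun t ht => (PySem.Set.mem_ofList _ _).2 (hbad t ht))
      have hmem' : ∀ x, x ∈ odd' ↔ tokens.count x % 2 = 1 := by
        intro x
        rw [hmem x]
        simp [PySem.Set.empty]
      rw [hA, heq]
      simp only [Bool.not_false, if_true]
      by_cases hodd : alphabet.any (fun symbol => PySem.List.count tokens symbol % 2 == 1) = true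
      · -- some alphabet symbol has odd count: odd' is nonempty
        obtain ⟨s, hs, hcnt⟩ := List.any_eq_true.1 hodd
        have hso : s ∈ odd' := (hmem' s).2 (by simpa [PySem.List.count] using hcnt)
        have hE : odd'.isEmpty = false := by
          cases odd' with
          | nil => cases hso
          | cons a l => rfl
        rw [hodd, hE]
        simp
      · have hf : (alphabet.any (fun symbol => PySem.List.count tokens symbol % 2 == 1)) = false := by
          revert hodd
          cases alphabet.any (fun symbol => PySem.List.count tokens symbol % 2 == 1) <;> simp
        have hnone : ∀ x, x ∉ odd' := by
          intro x hx
          have hcnt := (hmem' x).1 hx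
          have hxtok : x ∈ tokens := by
            by_contra hnt
            rw [List.count_eq_zero_of_not_mem hnt] at hcnt
            omega
          have hxal : x ∈ alphabet := hbad x hxtok
          have := List.any_eq_false.1 hf x hxal
          simp [PySem.List.count, hcnt] at this
        have hnil : odd' = [] := List.eq_nil_iff_forall_not_mem.2 hnone
        rw [hf, hnil]
        simp
  · rw [Bool.not_eq_true] at hlen
    simp only [hlen, Bool.not_false, if_true]
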